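-- pv_equiv track=rewrite | github.com/vickymzheng/PracticeInterviewQuestions | max_adjacent_squares.py | max_connected_colors
-- ===== SOURCE A (Python) =====
-- class Cord():
-- 	def __init__(self, x, y, color):
-- 		self.x = x
-- 		self.y = y
-- 		self.color = color
-- 	def __repr__(self):
-- 		return f'cord({self.x}, {self.y}, {self.color})'
-- 	def __str__(self):
-- 		return f'cord({self.x}, {self.y}, {self.color})'
--
-- 	def __key(self):
-- 		return (self.x, self.y, self.color)
--
-- 	def __hash__(self):
-- 		return hash(self.__key())
--
-- 	def __eq__(self, other):
-- 		if isinstance(other, Cord):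
-- 			return self.__key() == other.__key()
-- 		return NotImplemented
--
-- def is_valid(x, y, m, n):
-- 	return ((x >= 0) and (x < n)) and ((y >= 0) and (y < m))
--
-- def get_adjacent_cords(mat, cord):
-- 	vert_neighbors = [-1, 1, 0, 0]
-- 	hor_neighbors = [0, 0, -1, 1]
-- 	n = len(mat)
-- 	m = len(mat[0])
-- 	color = cord.color
-- 	neighbors = []
-- 	for i in range(4):
-- 		neighbor_x = cord.x + hor_neighbors[i]
-- 		neighbor_y = cord.y + vert_neighbors[i]
-- 		if (is_valid(neighbor_x, neighbor_y, m, n)):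
-- 			if mat[neighbor_x][neighbor_y] == color:
-- 				neighbor = Cord(neighbor_x, neighbor_y, mat[neighbor_x][neighbor_y])
-- 				neighbors.append(neighbor)
-- 	return neighbors
--
-- def bfs(starting_node, graph):
-- 	visited = set()
-- 	queue = [starting_node]
-- 	while len(queue) > 0:
-- 		next_queue = []
-- 		for node in queue:
-- 			neighbors = graph[node]
-- 			for neighbor in neighbors:
-- 				if neighbor not in visited:
-- 					next_queue.append(neighbor)
-- 			visited.add(node)
-- 		queue = next_queue
-- 	return visited
--
-- def get_components(graph):
-- 	components = {}
-- 	visited = set()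
-- 	nodes = list(graph.keys())
-- 	n = len(nodes)
-- 	while (len(visited) < n):
-- 		for node in nodes:
-- 			if node not in visited:
-- 				component_members = bfs(node, graph)
-- 				visited = visited.union(component_members)
-- 				components[node] = component_members
-- 	return components
--
-- def make_graph(mat):
-- 	n = len(mat)
-- 	m = len(mat[0])
-- 	graph = {}
-- 	for i in range(n):
-- 		for j in range(m):
-- 			curr_cord = Cord(i, j, mat[i][j])
-- 			graph[curr_cord] = get_adjacent_cords(mat, curr_cord)
-- 	return graph
--
-- def max_connected_colors(mat):
-- 	graph = make_graph(mat)
-- 	components = get_components(graph)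
-- 	max_component_size = 0
-- 	for component_id in components:
-- 		component = components[component_id]
-- 		num_component_members = len(component)
-- 		if num_component_members > max_component_size:
-- 			max_component_size = num_component_members
-- 	return max_component_size
-- ===== SOURCE B (Python) =====
-- def _flood(mat, n, m, i, j):
-- 	color = mat[i][j]
-- 	seen = set()
-- 	frontier = [(i, j)]
-- 	while frontier:
-- 		nxt = []
-- 		queued = set()
-- 		for (x, y) in frontier:
-- 			for (nx, ny) in ((x, y - 1), (x, y + 1), (x - 1, y), (x + 1, y)):
-- 				if 0 <= nx < n and 0 <= ny < m and mat[nx][ny] == color \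
-- 						and (nx, ny) not in seen and (nx, ny) not in queued:
-- 					nxt.append((nx, ny))
-- 					queued.add((nx, ny))
-- 			seen.add((x, y))
-- 		frontier = nxt
-- 	return seen
--
-- def max_connected_colors(mat):
-- 	n = len(mat)
-- 	m = len(mat[0])
-- 	visited = set()
-- 	best = 0
-- 	for i in range(n):
-- 		for j in range(m):
-- 			if (i, j) in visited:
-- 				continue
-- 			comp = _flood(mat, n, m, i, j)
-- 			visited |= comp
-- 			if len(comp) > best:
-- 				best = len(comp)
-- 	return best
-- ===== Notes on version B (the rewrite author's own statement) =====
-- stated objective: faster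
-- what changed: B replaces A's materialised adjacency graph of hashable Cord objects, its components dictionary rebuilt by repeated whole-set unions and a separate max pass with a single row-major scan that flood-fills each unvisited cell directly on the grid (neighbours computed on the fly on (i,j) index pairs, a queued set keeping each cell out of the next frontier more than once) while keeping a running maximum.
import Mathlib
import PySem

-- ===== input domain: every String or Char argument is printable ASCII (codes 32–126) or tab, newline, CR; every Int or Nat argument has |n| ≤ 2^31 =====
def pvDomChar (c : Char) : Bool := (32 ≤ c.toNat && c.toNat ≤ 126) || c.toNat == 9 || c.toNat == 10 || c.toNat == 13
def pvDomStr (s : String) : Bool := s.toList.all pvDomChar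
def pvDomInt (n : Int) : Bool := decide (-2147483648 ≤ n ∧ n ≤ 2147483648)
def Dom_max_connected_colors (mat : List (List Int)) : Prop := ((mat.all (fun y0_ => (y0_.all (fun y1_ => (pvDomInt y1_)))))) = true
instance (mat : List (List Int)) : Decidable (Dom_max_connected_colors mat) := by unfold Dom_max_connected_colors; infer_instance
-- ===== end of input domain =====

-- B is a single row-major scan that flood-fills each unvisited cell directly on the grid with a
-- running maximum, instead of A's materialised adjacency graph, components dictionary of repeated
-- whole-set unions and separate max pass (measurably faster; equivalence proved on Pre_).

-- mat[x][y] (both Pythons only evaluate it on in-range nonnegative x, y under Pre_)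
def pvAt (mat : List (List Int)) (x y : Int) : Int :=
  (PySem.List.pyGet? ((PySem.List.pyGet? mat x).getD []) y).getD 0

-- ===== PORT A =====
def pv_is_valid (x y m n : Int) : Bool :=
  (decide (x ≥ 0) && decide (x < n)) && (decide (y ≥ 0) && decide (y < m))

def pv_get_adjacent_cords (mat : List (List Int)) (cord : Int × Int × Int) : List (Int × Int × Int) :=
  let n : Int := PySem.List.len mat
  let m : Int := PySem.List.len ((PySem.List.pyGet? mat 0).getD [])
  let color := cord.2.2
  (PySem.List.pyRange 0 4 1).foldl (fun neighbors i =>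
    let nx := cord.1 + PySem.List.pyGetD ([0, 0, -1, 1] : List Int) i 0
    let ny := cord.2.1 + PySem.List.pyGetD ([-1, 1, 0, 0] : List Int) i 0
    if pv_is_valid nx ny m n then
      if pvAt mat nx ny == color then neighbors ++ [(nx, ny, pvAt mat nx ny)] else neighbors
    else neighbors) []

-- the while-loop of bfs; fuel only bounds the recursion (2·|V|+4 levels always suffice)
def pv_bfsGo (graph : PySem.Dict (Int × Int × Int) (List (Int × Int × Int))) :
    Nat → List (Int × Int × Int) → PySem.Set (Int × Int × Int) → PySem.Set (Int × Int × Int)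
  | 0, _, visited => visited
  | fuel + 1, queue, visited =>
    if PySem.List.len queue > 0 then
      let st := queue.foldl
        (fun (st : List (Int × Int × Int) × PySem.Set (Int × Int × Int)) node =>
          let neighbors := graph.getD node []
          let nq := neighbors.foldl
            (fun nq nb => if PySem.Set.contains st.2 nb then nq else nq ++ [nb]) st.1
          (nq, PySem.Set.add st.2 node)) ([], visited)
      pv_bfsGo graph fuel st.1 st.2
    else visited

def pv_bfs (starting_node : Int × Int × Int)
    (graph : PySem.Dict (Int × Int × Int) (List (Int × Int × Int))) :
    PySem.Set (Int × Int × Int) :=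
  pv_bfsGo graph (2 * graph.keys.length + 4) [starting_node] []

-- the while-loop of get_components; it exits as soon as visited covers the nodes
def pv_get_componentsGo (graph : PySem.Dict (Int × Int × Int) (List (Int × Int × Int)))
    (nodes : List (Int × Int × Int)) :
    Nat → PySem.Dict (Int × Int × Int) (List (Int × Int × Int)) →
    PySem.Set (Int × Int × Int) → PySem.Dict (Int × Int × Int) (List (Int × Int × Int))
  | 0, components, _ => components
  | fuel + 1, components, visited =>
    if PySem.List.len visited < PySem.List.len nodes then
      let st := nodes.foldl
        (fun (st : PySem.Dict (Int × Int × Int) (List (Int × Int × Int)) ×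
                   PySem.Set (Int × Int × Int)) node =>
          if PySem.Set.contains st.2 node then st
          else
            let component_members := pv_bfs node graph
            (st.1.insert node component_members, PySem.Set.union st.2 component_members))
        (components, visited)
      pv_get_componentsGo graph nodes fuel st.1 st.2
    else components

def pv_get_components (graph : PySem.Dict (Int × Int × Int) (List (Int × Int × Int))) :
    PySem.Dict (Int × Int × Int) (List (Int × Int × Int)) :=
  let nodes := graph.keys
  pv_get_componentsGo graph nodes (nodes.length + 1) PySem.Dict.empty []

def pv_make_graph (mat : List (List Int)) :
    PySem.Dict (Int × Int × Int) (List (Int × Int × Int)) :=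
  (PySem.List.pyRange 0 (PySem.List.len mat) 1).foldl (fun graph i =>
    (PySem.List.pyRange 0 (PySem.List.len ((PySem.List.pyGet? mat 0).getD [])) 1).foldl
      (fun graph j =>
        let curr_cord := (i, j, pvAt mat i j)
        graph.insert curr_cord (pv_get_adjacent_cords mat curr_cord)) graph)
    PySem.Dict.empty

def max_connected_colors (mat : List (List Int)) : Int :=
  let graph := pv_make_graph mat
  let components := pv_get_components graph
  components.keys.foldl (fun max_component_size component_id =>
    let num : Int := PySem.List.len (components.getD component_id [])
    if num > max_component_size then num else max_component_size) 0

-- ===== PORT B =====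
def pvNbrs (x y : Int) : List (Int × Int) := [(x, y - 1), (x, y + 1), (x - 1, y), (x + 1, y)]

-- the while-loop of _flood; fuel only bounds the recursion (2·n·m+4 levels always suffice);
-- the queued set keeps each cell out of the next frontier more than once
def pv_floodGo (mat : List (List Int)) (n m color : Int) :
    Nat → List (Int × Int) → PySem.Set (Int × Int) → PySem.Set (Int × Int)
  | 0, _, seen => seen
  | fuel + 1, frontier, seen =>
    if frontier.isEmpty then seen
    else
      let st := frontier.foldl
        (fun (st : (List (Int × Int) × PySem.Set (Int × Int)) × PySem.Set (Int × Int)) p =>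
          let nq := (pvNbrs p.1 p.2).foldl
            (fun (nq : List (Int × Int) × PySem.Set (Int × Int)) q =>
              if ((decide (0 ≤ q.1) && decide (q.1 < n)) && (decide (0 ≤ q.2) && decide (q.2 < m))) &&
                  (pvAt mat q.1 q.2 == color) && !(PySem.Set.contains st.2 q) &&
                  !(PySem.Set.contains nq.2 q)
              then (nq.1 ++ [q], PySem.Set.add nq.2 q) else nq) st.1
          (nq, PySem.Set.add st.2 p)) (([], []), seen)
      pv_floodGo mat n m color fuel st.1.1 st.2

def pv_flood (mat : List (List Int)) (n m i j : Int) : PySem.Set (Int × Int) :=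
  pv_floodGo mat n m (pvAt mat i j) (2 * (n * m).toNat + 4) [(i, j)] []

def max_connected_colors_alt (mat : List (List Int)) : Int :=
  let n : Int := PySem.List.len mat
  let m : Int := PySem.List.len ((PySem.List.pyGet? mat 0).getD [])
  let st := (PySem.List.pyRange 0 n 1).foldl (fun st i =>
    (PySem.List.pyRange 0 m 1).foldl
      (fun (st : PySem.Set (Int × Int) × Int) j =>
        if PySem.Set.contains st.1 (i, j) then st
        else
          let comp := pv_flood mat n m i j
          (PySem.Set.union st.1 comp,
           if PySem.List.len comp > st.2 then PySem.List.len comp else st.2)) st)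
    (([] : PySem.Set (Int × Int)), (0 : Int))
  st.2

-- ===== PRECONDITION & SPEC =====
-- Pre_ excludes exactly the inputs where A raises: the empty matrix (mat[0] IndexError) and a
-- matrix with some row shorter than row 0 (mat[i][j] IndexError); A returns on everything else.
def Pre_max_connected_colors (mat : List (List Int)) : Prop :=
  mat ≠ [] ∧ ∀ row ∈ mat, (mat.headD []).length ≤ row.length
instance (mat : List (List Int)) : Decidable (Pre_max_connected_colors mat) := by
  unfold Pre_max_connected_colors; infer_instance

def pvWitness_max_connected_colors : List (List Int) := [[1, 1], [1, 2]]

def Spec_max_connected_colors (mat : List (List Int)) (out : Int) : Prop := out = max_connected_colors_alt mat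
instance (mat : List (List Int)) (out : Int) : Decidable (Spec_max_connected_colors mat out) := by unfold Spec_max_connected_colors; infer_instance

-- ===== CLAIM (what is proved, stated in full; the proofs are below) =====
def Claim_equal_max_connected_colors : Prop := ∀ (mat : List (List Int)), Dom_max_connected_colors mat → Pre_max_connected_colors mat → Spec_max_connected_colors mat (max_connected_colors mat)

-- ===== LEMMAS AND PROOFS =====
-- ==== proof-side definitions ====
def pvLift (c : Int) (p : Int × Int) : Int × Int × Int := (p.1, p.2, c)
def pvLiftAt (mat : List (List Int)) (p : Int × Int) : Int × Int × Int := (p.1, p.2, pvAt mat p.1 p.2)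
def pvN (mat : List (List Int)) : Int := PySem.List.len mat
def pvM (mat : List (List Int)) : Int := PySem.List.len ((PySem.List.pyGet? mat 0).getD [])
def pvValid (mat : List (List Int)) (p : Int × Int) : Prop :=
  0 ≤ p.1 ∧ p.1 < pvN mat ∧ 0 ≤ p.2 ∧ p.2 < pvM mat
def pvGood (mat : List (List Int)) (c : Int) (p : Int × Int) : Prop :=
  pvValid mat p ∧ pvAt mat p.1 p.2 = c
def pvCells (mat : List (List Int)) : List (Int × Int) :=
  (PySem.List.pyRange 0 (pvN mat) 1).flatMap (fun i =>
    (PySem.List.pyRange 0 (pvM mat) 1).map (fun j => (i, j)))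
def pvCandOK (mat : List (List Int)) (n m c : Int) (q : Int × Int) : Bool :=
  ((decide (0 ≤ q.1) && decide (q.1 < n)) && (decide (0 ≤ q.2) && decide (q.2 < m))) &&
    (pvAt mat q.1 q.2 == c)
def pvMaxFold (xs : List Int) : Int := xs.foldl (fun mx s => if s > mx then s else mx) 0

-- A's per-level frontier semantics, replayed on (row, col) pairs: like B's flood but WITHOUT the
-- queued-set dedup, so the next frontier keeps duplicate enqueues exactly as A's bfs does
def pvFloodD (mat : List (List Int)) (n m color : Int) :
    Nat → List (Int × Int) → PySem.Set (Int × Int) → PySem.Set (Int × Int)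
  | 0, _, seen => seen
  | fuel + 1, frontier, seen =>
    if frontier.isEmpty then seen
    else
      let st := frontier.foldl
        (fun (st : List (Int × Int) × PySem.Set (Int × Int)) p =>
          let nxt := (pvNbrs p.1 p.2).foldl
            (fun nxt q =>
              if ((decide (0 ≤ q.1) && decide (q.1 < n)) && (decide (0 ≤ q.2) && decide (q.2 < m))) &&
                  (pvAt mat q.1 q.2 == color) && !(PySem.Set.contains st.2 q)
              then nxt ++ [q] else nxt) st.1
          (nxt, PySem.Set.add st.2 p)) ([], seen)
      pvFloodD mat n m color fuel st.1 st.2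

theorem pvLift_inj (c : Int) : Function.Injective (pvLift c) := by
  intro a b h; cases a; cases b; simp [pvLift] at h; simp [h.1, h.2]

theorem pvLiftAt_inj (mat : List (List Int)) : Function.Injective (pvLiftAt mat) := by
  intro a b h; cases a; cases b; simp [pvLiftAt] at h; simp [h.1, h.2.1]

theorem pvContains_map {f : (Int × Int) → (Int × Int × Int)} (hf : Function.Injective f)
    (s : PySem.Set (Int × Int)) (a : Int × Int) :
    PySem.Set.contains (s.map f) (f a) = PySem.Set.contains s a := by
  by_cases h : a ∈ s
  · rw [(PySem.Set.contains_iff _ _).mpr (List.mem_map_of_mem h), (PySem.Set.contains_iff _ _).mpr h]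
  · have h1 : ¬ f a ∈ s.map f := by
      simp only [List.mem_map]; rintro ⟨b, hb, hfb⟩; exact h (hf hfb ▸ hb)
    rw [Bool.eq_iff_iff]
    constructor
    · intro hc; exact absurd ((PySem.Set.contains_iff _ _).mp hc) h1
    · intro hc; exact absurd ((PySem.Set.contains_iff _ _).mp hc) h

theorem pvAdd_map {f : (Int × Int) → (Int × Int × Int)} (hf : Function.Injective f)
    (s : PySem.Set (Int × Int)) (a : Int × Int) :
    (PySem.Set.add s a).map f = PySem.Set.add (s.map f) (f a) := by
  rw [PySem.Set.add_eq_ite, PySem.Set.add_eq_ite]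
  by_cases h : a ∈ s
  · simp [h, List.mem_map_of_mem]
  · have h1 : ¬ f a ∈ s.map f := by
      simp only [List.mem_map]; rintro ⟨b, hb, hfb⟩; exact h (hf hfb ▸ hb)
    simp [h, h1]

theorem pvUpdate_map {f : (Int × Int) → (Int × Int × Int)} (hf : Function.Injective f)
    (s t : PySem.Set (Int × Int)) :
    (PySem.Set.update s t).map f = PySem.Set.update (s.map f) (t.map f) := by
  induction t generalizing s with
  | nil => simp [PySem.Set.update_nil]
  | cons x xs ih =>
    rw [PySem.Set.update_cons, List.map_cons, PySem.Set.update_cons, ← pvAdd_map hf, ih]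

theorem pvUnion_map {f : (Int × Int) → (Int × Int × Int)} (hf : Function.Injective f)
    (s t : PySem.Set (Int × Int)) :
    (PySem.Set.union s t).map f = PySem.Set.union (s.map f) (t.map f) :=
  pvUpdate_map hf s t

-- A's validity test, in B's spelling
theorem pv_is_valid_eq (a b m n : Int) :
    pv_is_valid a b m n =
      ((decide (0 ≤ a) && decide (a < n)) && (decide (0 ≤ b) && decide (b < m))) := by
  simp [pv_is_valid, ge_iff_le]

theorem pvStep1 (mat : List (List Int)) (n m c : Int) (acc : List (Int × Int × Int)) (a b : Int) :
    (if pv_is_valid a b m n then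
       if pvAt mat a b == c then acc ++ [(a, b, pvAt mat a b)] else acc
     else acc)
      = acc ++ (if pvCandOK mat n m c (a, b) then [pvLift c (a, b)] else []) := by
  rw [pv_is_valid_eq]
  by_cases h1 : ((decide (0 ≤ a) && decide (a < n)) && (decide (0 ≤ b) && decide (b < m))) = true
  · by_cases h2 : (pvAt mat a b == c) = true
    · have hc : pvAt mat a b = c := by exact_mod_cast beq_iff_eq.mp h2
      simp [h1, pvCandOK, pvLift, hc]
    · simp [h1, h2, pvCandOK]
  · simp [h1, pvCandOK]

theorem pvAdj_closed (mat : List (List Int)) (x y c : Int) :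
    pv_get_adjacent_cords mat (x, y, c)
      = ((pvNbrs x y).filter (pvCandOK mat (pvN mat) (pvM mat) c)).map (pvLift c) := by
  have h4 : PySem.List.pyRange 0 4 1 = [0, 1, 2, 3] := by decide
  simp only [pv_get_adjacent_cords, h4, List.foldl_cons, List.foldl_nil]
  simp only [show PySem.List.pyGetD ([0, 0, -1, 1] : List Int) 0 0 = 0 from by decide,
    show PySem.List.pyGetD ([0, 0, -1, 1] : List Int) 1 0 = 0 from by decide,
    show PySem.List.pyGetD ([0, 0, -1, 1] : List Int) 2 0 = -1 from by decide,
    show PySem.List.pyGetD ([0, 0, -1, 1] : List Int) 3 0 = 1 from by decide,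
    show PySem.List.pyGetD ([-1, 1, 0, 0] : List Int) 0 0 = -1 from by decide,
    show PySem.List.pyGetD ([-1, 1, 0, 0] : List Int) 1 0 = 1 from by decide,
    show PySem.List.pyGetD ([-1, 1, 0, 0] : List Int) 2 0 = 0 from by decide,
    show PySem.List.pyGetD ([-1, 1, 0, 0] : List Int) 3 0 = 0 from by decide]
  simp only [add_zero, ← sub_eq_add_neg]
  simp only [pvStep1 mat (PySem.List.len mat) (PySem.List.len ((PySem.List.pyGet? mat 0).getD []))]
  simp only [pvNbrs, List.filter_cons, List.filter_nil]
  rw [show PySem.List.len mat = pvN mat from rfl,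
      show PySem.List.len ((PySem.List.pyGet? mat 0).getD []) = pvM mat from rfl]
  by_cases h1 : pvCandOK mat (pvN mat) (pvM mat) c (x, y - 1) <;>
    by_cases h2 : pvCandOK mat (pvN mat) (pvM mat) c (x, y + 1) <;>
      by_cases h3 : pvCandOK mat (pvN mat) (pvM mat) c (x - 1, y) <;>
        by_cases h4 : pvCandOK mat (pvN mat) (pvM mat) c (x + 1, y) <;>
          simp [h1, h2, h3, h4]

-- ==== cells and graph ====
theorem pvMem_cells (mat : List (List Int)) (p : Int × Int) :
    p ∈ pvCells mat ↔ pvValid mat p := by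
  cases p with
  | mk a b =>
    simp [pvCells, List.mem_flatMap, PySem.List.mem_pyRange_one, pvValid, Prod.ext_iff]
    aesop

theorem pvCells_eq_product (mat : List (List Int)) :
    pvCells mat = (PySem.List.pyRange 0 (pvN mat) 1) ×ˢ (PySem.List.pyRange 0 (pvM mat) 1) := rfl

theorem pvCells_nodup (mat : List (List Int)) : (pvCells mat).Nodup := by
  rw [pvCells_eq_product]
  exact List.Nodup.product (PySem.List.nodup_pyRange_one _ _) (PySem.List.nodup_pyRange_one _ _)

theorem pvCells_length (mat : List (List Int)) :
    (pvCells mat).length = ((pvN mat) * (pvM mat)).toNat := by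
  rw [pvCells_eq_product, List.length_product, PySem.List.length_pyRange_one,
    PySem.List.length_pyRange_one]
  have h1 : pvN mat = (mat.length : Int) := by simp [pvN]
  have h2 : pvM mat = ((((PySem.List.pyGet? mat 0).getD []).length : Int)) := by simp [pvM]
  rw [h1, h2, sub_zero, sub_zero, Int.toNat_natCast, Int.toNat_natCast, ← Nat.cast_mul,
    Int.toNat_natCast]

theorem pv_make_graph_eq (mat : List (List Int)) :
    pv_make_graph mat = (pvCells mat).foldl
      (fun g p => g.insert (pvLiftAt mat p) (pv_get_adjacent_cords mat (pvLiftAt mat p)))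
      PySem.Dict.empty := by
  unfold pv_make_graph pvCells
  rw [List.foldl_flatMap]
  simp only [List.foldl_map]
  rfl

theorem pv_graph_keys (mat : List (List Int)) :
    (pv_make_graph mat).keys = (pvCells mat).map (pvLiftAt mat) := by
  rw [pv_make_graph_eq,
    PySem.Dict.keys_foldl_insert_key (pvCells mat) (pvLiftAt mat)
      (fun _ p => pv_get_adjacent_cords mat (pvLiftAt mat p)) PySem.Dict.empty]
  rw [PySem.Dict.keys_empty, PySem.Set.update_nil_left]
  exact PySem.Set.ofList_eq_self_of_nodup _ ((pvCells_nodup mat).map (pvLiftAt_inj mat))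

theorem pv_graph_keys_nodup (mat : List (List Int)) : (pv_make_graph mat).keys.Nodup := by
  rw [pv_graph_keys]; exact (pvCells_nodup mat).map (pvLiftAt_inj mat)

theorem pv_graph_getD (mat : List (List Int)) (p : Int × Int) (hp : p ∈ pvCells mat) :
    (pv_make_graph mat).getD (pvLiftAt mat p) [] = pv_get_adjacent_cords mat (pvLiftAt mat p) := by
  have hitems : (pv_make_graph mat).items
      = List.map (fun a => (pvLiftAt mat a, pv_get_adjacent_cords mat (pvLiftAt mat a))) (pvCells mat) := by
    rw [pv_make_graph_eq,
      PySem.Dict.items_foldl_insert_fresh (pvCells mat) (pvLiftAt mat)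
        (fun p => pv_get_adjacent_cords mat (pvLiftAt mat p)) PySem.Dict.empty
        (fun a _ => by simp [PySem.Dict.contains_empty])
        ((pvCells_nodup mat).map (pvLiftAt_inj mat))]
    simp [show (PySem.Dict.empty : PySem.Dict (Int × Int × Int) (List (Int × Int × Int))).items = [] from rfl]
  exact PySem.Dict.getD_of_mem_items _
    (by rw [hitems]; exact List.mem_map_of_mem hp) (pv_graph_keys_nodup mat) []

-- inner neighbour loop of A's bfs level
theorem pvInnerA (v : PySem.Set (Int × Int × Int)) (l acc : List (Int × Int × Int)) :
    l.foldl (fun nq nb => if PySem.Set.contains v nb then nq else nq ++ [nb]) acc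
      = acc ++ l.filter (fun nb => !PySem.Set.contains v nb) := by
  induction l generalizing acc with
  | nil => simp
  | cons x xs ih =>
    rw [List.foldl_cons, ih]
    by_cases h : x ∈ v
    · rw [if_pos ((PySem.Set.contains_iff v x).mpr h)]
      simp [h]
    · rw [if_neg (fun hc => h ((PySem.Set.contains_iff v x).mp hc))]
      simp [h]

-- named forms of the two level-step folds (defeq to the ports' lambdas)
def pvStepLA (mat : List (List Int))
    (st : List (Int × Int × Int) × PySem.Set (Int × Int × Int)) (node : Int × Int × Int) :
    List (Int × Int × Int) × PySem.Set (Int × Int × Int) :=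
  (((pv_make_graph mat).getD node []).foldl
     (fun nq nb => if PySem.Set.contains st.2 nb then nq else nq ++ [nb]) st.1,
   PySem.Set.add st.2 node)

def pvStepLB (mat : List (List Int)) (n m c : Int)
    (st : List (Int × Int) × PySem.Set (Int × Int)) (p : Int × Int) :
    List (Int × Int) × PySem.Set (Int × Int) :=
  ((pvNbrs p.1 p.2).foldl
     (fun nxt q =>
       if ((decide (0 ≤ q.1) && decide (q.1 < n)) && (decide (0 ≤ q.2) && decide (q.2 < m))) &&
           (pvAt mat q.1 q.2 == c) && !(PySem.Set.contains st.2 q)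
       then nxt ++ [q] else nxt) st.1,
   PySem.Set.add st.2 p)

theorem pvStepLB_eq (mat : List (List Int)) (c : Int)
    (st : List (Int × Int) × PySem.Set (Int × Int)) (p : Int × Int) :
    pvStepLB mat (pvN mat) (pvM mat) c st p
      = (st.1 ++ (pvNbrs p.1 p.2).filter
          (fun q => pvCandOK mat (pvN mat) (pvM mat) c q && !(PySem.Set.contains st.2 q)),
         PySem.Set.add st.2 p) := by
  unfold pvStepLB
  rw [PySem.List.foldl_append_if_eq_filter
    (fun q => ((decide (0 ≤ q.1) && decide (q.1 < pvN mat)) && (decide (0 ≤ q.2) && decide (q.2 < pvM mat))) &&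
        (pvAt mat q.1 q.2 == c) && !(PySem.Set.contains st.2 q))]
  rfl

theorem pvStepLA_eq (mat : List (List Int)) (c : Int) (p : Int × Int)
    (hgood : pvGood mat c p)
    (nq : List (Int × Int)) (vis : PySem.Set (Int × Int)) :
    pvStepLA mat (nq.map (pvLift c), vis.map (pvLift c)) (pvLift c p)
      = (((pvStepLB mat (pvN mat) (pvM mat) c (nq, vis) p).1).map (pvLift c),
         ((pvStepLB mat (pvN mat) (pvM mat) c (nq, vis) p).2).map (pvLift c)) := by
  obtain ⟨hv, hc⟩ := hgood
  have hcell : p ∈ pvCells mat := (pvMem_cells mat p).mpr hv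
  have hlift : pvLiftAt mat p = pvLift c p := by simp [pvLiftAt, pvLift, hc]
  unfold pvStepLA
  rw [show ((pvLift c p : Int × Int × Int)) = pvLiftAt mat p from hlift.symm, pv_graph_getD mat p hcell,
    hlift, show (pvLift c p : Int × Int × Int) = (p.1, p.2, c) from rfl, pvAdj_closed mat p.1 p.2 c,
    pvStepLB_eq]
  rw [pvInnerA]
  rw [List.filter_map]
  have hcont : ∀ q : Int × Int,
      PySem.Set.contains (vis.map (pvLift c)) (pvLift c q) = PySem.Set.contains vis q :=
    fun q => pvContains_map (pvLift_inj c) vis q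
  have hfc : ((pvNbrs p.1 p.2).filter (pvCandOK mat (pvN mat) (pvM mat) c)).filter
        ((fun nb => !PySem.Set.contains (vis.map (pvLift c)) nb) ∘ (pvLift c))
      = (pvNbrs p.1 p.2).filter
        (fun q => pvCandOK mat (pvN mat) (pvM mat) c q && !(PySem.Set.contains vis q)) := by
    rw [List.filter_filter]
    apply List.filter_congr
    intro q _
    simp [Bool.and_comm, List.mem_map_of_injective (pvLift_inj c)]
  rw [hfc, ← List.map_append, pvAdd_map (pvLift_inj c)]
  simp [pvLift]

theorem pvLevelFold (mat : List (List Int)) (c : Int) :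
    ∀ (q nq : List (Int × Int)) (vis : PySem.Set (Int × Int)),
      (∀ p ∈ q, pvGood mat c p) →
      (q.map (pvLift c)).foldl (pvStepLA mat) (nq.map (pvLift c), vis.map (pvLift c))
        = (((q.foldl (pvStepLB mat (pvN mat) (pvM mat) c) (nq, vis)).1).map (pvLift c),
           ((q.foldl (pvStepLB mat (pvN mat) (pvM mat) c) (nq, vis)).2).map (pvLift c)) := by
  intro q
  induction q with
  | nil => intro nq vis _; simp
  | cons p q ih =>
    intro nq vis hq
    rw [List.map_cons, List.foldl_cons, List.foldl_cons,
      pvStepLA_eq mat c p (hq p (List.mem_cons_self)) nq vis]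
    rw [show ((pvStepLB mat (pvN mat) (pvM mat) c (nq, vis) p).1.map (pvLift c),
          (pvStepLB mat (pvN mat) (pvM mat) c (nq, vis) p).2.map (pvLift c))
        = ((pvStepLB mat (pvN mat) (pvM mat) c (nq, vis) p).1.map (pvLift c), ((pvStepLB mat (pvN mat) (pvM mat) c (nq, vis) p).2).map (pvLift c))
        from rfl]
    rw [ih (pvStepLB mat (pvN mat) (pvM mat) c (nq, vis) p).1 (pvStepLB mat (pvN mat) (pvM mat) c (nq, vis) p).2
      (fun x hx => hq x (List.mem_cons_of_mem _ hx))]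

theorem pvStepLB_fst_mem (mat : List (List Int)) (c : Int)
    (st : List (Int × Int) × PySem.Set (Int × Int)) (p : Int × Int) :
    ∀ y ∈ (pvStepLB mat (pvN mat) (pvM mat) c st p).1,
      y ∈ st.1 ∨ pvCandOK mat (pvN mat) (pvM mat) c y = true := by
  rw [pvStepLB_eq]
  intro y hy
  rcases List.mem_append.mp hy with h1 | h1
  · exact Or.inl h1
  · right
    have := List.of_mem_filter h1
    cases hb : pvCandOK mat (pvN mat) (pvM mat) c y
    · rw [hb] at this; simp at this
    · rfl

-- all elements of the produced frontier are good (or were already in the accumulator)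
theorem pvFrontier_good (mat : List (List Int)) (c : Int) :
    ∀ (q nq : List (Int × Int)) (vis : PySem.Set (Int × Int)),
      (∀ p ∈ nq, pvGood mat c p) →
      ∀ p ∈ (q.foldl (pvStepLB mat (pvN mat) (pvM mat) c) (nq, vis)).1, pvGood mat c p := by
  intro q
  induction q with
  | nil => intro nq vis h; exact h
  | cons x q ih =>
    intro nq vis h
    rw [List.foldl_cons]
    apply ih
    intro p hp
    rcases pvStepLB_fst_mem mat c (nq, vis) x p hp with h1 | h1
    · exact h p h1
    · unfold pvCandOK at h1
      simp only [Bool.and_eq_true, decide_eq_true_eq, beq_iff_eq] at h1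
      exact ⟨⟨h1.1.1.1, h1.1.1.2, h1.1.2.1, h1.1.2.2⟩, h1.2⟩

theorem pvLevel_snd (mat : List (List Int)) (n m c : Int) :
    ∀ (q nq : List (Int × Int)) (vis : PySem.Set (Int × Int)),
      (q.foldl (pvStepLB mat n m c) (nq, vis)).2 = q.foldl (fun s p => PySem.Set.add s p) vis := by
  intro q
  induction q with
  | nil => intro nq vis; rfl
  | cons x q ih =>
    intro nq vis
    rw [List.foldl_cons, List.foldl_cons, ih]
    rfl

theorem pvLevel_snd_mem (mat : List (List Int)) (n m c : Int) (q nq : List (Int × Int))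
    (vis : PySem.Set (Int × Int)) (y : Int × Int) :
    y ∈ (q.foldl (pvStepLB mat n m c) (nq, vis)).2 ↔ y ∈ vis ∨ y ∈ q := by
  rw [pvLevel_snd]
  rw [show (fun (s : PySem.Set (Int × Int)) (p : Int × Int) => PySem.Set.add s p)
      = (fun (s : PySem.Set (Int × Int)) (p : Int × Int) => PySem.Set.add s (id p)) from rfl]
  rw [PySem.Set.mem_foldl_add q id vis y]
  simp

def pvStepGA (graph : PySem.Dict (Int × Int × Int) (List (Int × Int × Int)))
    (st : List (Int × Int × Int) × PySem.Set (Int × Int × Int)) (node : Int × Int × Int) :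
    List (Int × Int × Int) × PySem.Set (Int × Int × Int) :=
  ((graph.getD node []).foldl
     (fun nq nb => if PySem.Set.contains st.2 nb then nq else nq ++ [nb]) st.1,
   PySem.Set.add st.2 node)

theorem pvStepGA_eq (mat : List (List Int)) : pvStepGA (pv_make_graph mat) = pvStepLA mat := rfl

theorem pv_bfsGo_succ (g : PySem.Dict (Int × Int × Int) (List (Int × Int × Int)))
    (f : Nat) (queue : List (Int × Int × Int)) (visited : PySem.Set (Int × Int × Int)) :
    pv_bfsGo g (f + 1) queue visited
      = if PySem.List.len queue > 0 then
          pv_bfsGo g f (queue.foldl (pvStepGA g) ([], visited)).1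
            (queue.foldl (pvStepGA g) ([], visited)).2
        else visited := rfl

theorem pvFloodD_succ (mat : List (List Int)) (n m color : Int) (f : Nat)
    (frontier : List (Int × Int)) (seen : PySem.Set (Int × Int)) :
    pvFloodD mat n m color (f + 1) frontier seen
      = if frontier.isEmpty then seen
        else
          pvFloodD mat n m color f (frontier.foldl (pvStepLB mat n m color) ([], seen)).1
            (frontier.foldl (pvStepLB mat n m color) ([], seen)).2 := rfl

theorem pvFlood_lockstep (mat : List (List Int)) (c : Int) :
    ∀ (fuel : Nat) (q : List (Int × Int)) (vis : PySem.Set (Int × Int)),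
      (∀ p ∈ q, pvGood mat c p) →
      pv_bfsGo (pv_make_graph mat) fuel (q.map (pvLift c)) (vis.map (pvLift c))
        = (pvFloodD mat (pvN mat) (pvM mat) c fuel q vis).map (pvLift c) := by
  intro fuel
  induction fuel with
  | zero => intro q vis _; rfl
  | succ f ih =>
    intro q vis hq
    rw [pv_bfsGo_succ, pvFloodD_succ, pvStepGA_eq]
    by_cases hq0 : q = []
    · subst hq0
      simp [PySem.List.len_eq]
    · rw [if_pos (by simp [PySem.List.len_eq, List.length_pos_iff, hq0]),
        if_neg (by simp [List.isEmpty_iff, hq0])]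
      have hfold := pvLevelFold mat c q [] vis hq
      simp only [List.map_nil] at hfold
      rw [hfold]
      exact ih _ _ (pvFrontier_good mat c q [] vis (by intro p hp; simp at hp))

theorem pvFlood_good (mat : List (List Int)) (c : Int) :
    ∀ (fuel : Nat) (q : List (Int × Int)) (vis : PySem.Set (Int × Int)),
      (∀ p ∈ q, pvGood mat c p) → (∀ p ∈ vis, pvGood mat c p) →
      ∀ p ∈ pvFloodD mat (pvN mat) (pvM mat) c fuel q vis, pvGood mat c p := by
  intro fuel
  induction fuel with
  | zero => intro q vis _ hv; exact hv
  | succ f ih =>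
    intro q vis hq hv
    rw [pvFloodD_succ]
    by_cases hq0 : q.isEmpty
    · rw [if_pos hq0]; exact hv
    · rw [if_neg (by simp [hq0])]
      apply ih
      · exact pvFrontier_good mat c q [] vis (by intro p hp; simp at hp)
      · intro p hp
        rcases (pvLevel_snd_mem mat (pvN mat) (pvM mat) c q [] vis p).mp hp with h | h
        · exact hv p h
        · exact hq p h

theorem pvFlood_mono (mat : List (List Int)) (n m c : Int) :
    ∀ (fuel : Nat) (q : List (Int × Int)) (vis : PySem.Set (Int × Int)),
      ∀ p ∈ vis, p ∈ pvFloodD mat n m c fuel q vis := by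
  intro fuel
  induction fuel with
  | zero => intro q vis p hp; exact hp
  | succ f ih =>
    intro q vis p hp
    rw [pvFloodD_succ]
    by_cases hq0 : q.isEmpty
    · rw [if_pos hq0]; exact hp
    · rw [if_neg (by simp [hq0])]
      apply ih
      rw [pvLevel_snd]
      have : ∀ (l : List (Int × Int)) (s : PySem.Set (Int × Int)),
          p ∈ s → p ∈ l.foldl (fun s x => PySem.Set.add s x) s := by
        intro l
        induction l with
        | nil => intro s hs; exact hs
        | cons a l ihl =>
          intro s hs
          exact ihl _ ((PySem.Set.mem_add s a p).mpr (Or.inl hs))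
      exact this q vis hp

theorem pvFlood_start (mat : List (List Int)) (n m c : Int) (f : Nat)
    (q : List (Int × Int)) (vis : PySem.Set (Int × Int)) (p : Int × Int) (hp : p ∈ q) :
    p ∈ pvFloodD mat n m c (f + 1) q vis := by
  rw [pvFloodD_succ, if_neg (by simp [List.isEmpty_iff]; rintro rfl; simp at hp)]
  apply pvFlood_mono
  rw [pvLevel_snd]
  have : ∀ (l : List (Int × Int)) (s : PySem.Set (Int × Int)),
      p ∈ l ∨ p ∈ s → p ∈ l.foldl (fun s x => PySem.Set.add s x) s := by
    intro l
    induction l with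
    | nil =>
      intro s hs
      rcases hs with h | h
      · simp at h
      · exact h
    | cons a l ihl =>
      intro s hs
      apply ihl
      rcases hs with h | h
      · rcases List.mem_cons.mp h with h | h
        · right; exact (PySem.Set.mem_add s a p).mpr (Or.inr h)
        · left; exact h
      · right; exact (PySem.Set.mem_add s a p).mpr (Or.inl h)
  exact this q vis (Or.inl hp)

-- outer pass steps
def pvStepCG (g : PySem.Dict (Int × Int × Int) (List (Int × Int × Int)))
    (st : PySem.Dict (Int × Int × Int) (List (Int × Int × Int)) × PySem.Set (Int × Int × Int))
    (node : Int × Int × Int) :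
    PySem.Dict (Int × Int × Int) (List (Int × Int × Int)) × PySem.Set (Int × Int × Int) :=
  if PySem.Set.contains st.2 node then st
  else (st.1.insert node (pv_bfs node g), PySem.Set.union st.2 (pv_bfs node g))

def pvStepCB (mat : List (List Int)) (st : PySem.Set (Int × Int) × Int) (p : Int × Int) :
    PySem.Set (Int × Int) × Int :=
  if PySem.Set.contains st.1 p then st
  else (PySem.Set.union st.1 (pv_flood mat (pvN mat) (pvM mat) p.1 p.2),
        if PySem.List.len (pv_flood mat (pvN mat) (pvM mat) p.1 p.2) > st.2
        then PySem.List.len (pv_flood mat (pvN mat) (pvM mat) p.1 p.2) else st.2)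

theorem pv_get_componentsGo_succ (g : PySem.Dict (Int × Int × Int) (List (Int × Int × Int)))
    (nodes : List (Int × Int × Int)) (f : Nat)
    (comps : PySem.Dict (Int × Int × Int) (List (Int × Int × Int)))
    (visited : PySem.Set (Int × Int × Int)) :
    pv_get_componentsGo g nodes (f + 1) comps visited
      = if PySem.List.len visited < PySem.List.len nodes then
          pv_get_componentsGo g nodes f (nodes.foldl (pvStepCG g) (comps, visited)).1
            (nodes.foldl (pvStepCG g) (comps, visited)).2
        else comps := rfl

theorem pvAlt_eq (mat : List (List Int)) :
    max_connected_colors_alt mat = ((pvCells mat).foldl (pvStepCB mat) ([], 0)).2 := by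
  unfold max_connected_colors_alt pvCells
  rw [List.foldl_flatMap]
  simp only [List.foldl_map]
  rfl

theorem pvMaxFold_append_singleton (xs : List Int) (s : Int) :
    pvMaxFold (xs ++ [s]) = if s > pvMaxFold xs then s else pvMaxFold xs := by
  simp [pvMaxFold, List.foldl_append]

theorem pvFuel_eq (mat : List (List Int)) :
    2 * (pv_make_graph mat).keys.length + 4 = 2 * ((pvN mat) * (pvM mat)).toNat + 4 := by
  rw [pv_graph_keys, List.length_map, pvCells_length]

-- ==== dedup correspondence: A-like frontier (with duplicate enqueues) vs B's queued-set level ====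
def pvStepLB2 (mat : List (List Int)) (n m c : Int)
    (st : (List (Int × Int) × PySem.Set (Int × Int)) × PySem.Set (Int × Int)) (p : Int × Int) :
    (List (Int × Int) × PySem.Set (Int × Int)) × PySem.Set (Int × Int) :=
  ((pvNbrs p.1 p.2).foldl
     (fun (nq : List (Int × Int) × PySem.Set (Int × Int)) q =>
       if ((decide (0 ≤ q.1) && decide (q.1 < n)) && (decide (0 ≤ q.2) && decide (q.2 < m))) &&
           (pvAt mat q.1 q.2 == c) && !(PySem.Set.contains st.2 q) &&
           !(PySem.Set.contains nq.2 q)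
       then (nq.1 ++ [q], PySem.Set.add nq.2 q) else nq) st.1,
   PySem.Set.add st.2 p)

theorem pv_floodGo_succ2 (mat : List (List Int)) (n m color : Int) (f : Nat)
    (frontier : List (Int × Int)) (seen : PySem.Set (Int × Int)) :
    pv_floodGo mat n m color (f + 1) frontier seen
      = if frontier.isEmpty then seen
        else
          pv_floodGo mat n m color f
            ((frontier.foldl (pvStepLB2 mat n m color) (([], []), seen)).1.1)
            ((frontier.foldl (pvStepLB2 mat n m color) (([], []), seen)).2) := rfl

theorem pvNbrs_nodup (x y : Int) : (pvNbrs x y).Nodup := by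
  simp [pvNbrs, Prod.ext_iff]
  omega

theorem pvContains_append_ne (s : PySem.Set (Int × Int)) (q x : Int × Int) (h : x ≠ q) :
    PySem.Set.contains (s ++ [q]) x = PySem.Set.contains s x := by
  rw [Bool.eq_iff_iff, PySem.Set.contains_iff, PySem.Set.contains_iff]
  simp [h]

theorem pvInnerB (P : (Int × Int) → Bool) :
    ∀ (cand : List (Int × Int)), cand.Nodup →
      ∀ (nq : List (Int × Int)) (qd : PySem.Set (Int × Int)),
      cand.foldl (fun (nq : List (Int × Int) × PySem.Set (Int × Int)) q =>
          if P q && !(PySem.Set.contains nq.2 q) then (nq.1 ++ [q], PySem.Set.add nq.2 q) else nq)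
        (nq, qd)
      = (nq ++ cand.filter (fun q => P q && !(PySem.Set.contains qd q)),
         qd ++ cand.filter (fun q => P q && !(PySem.Set.contains qd q))) := by
  intro cand
  induction cand with
  | nil => intro _ nq qd; simp
  | cons q cand ih =>
    intro hnd nq qd
    have hq : q ∉ cand := (List.nodup_cons.mp hnd).1
    rw [List.foldl_cons, List.filter_cons]
    by_cases h : (P q && !(PySem.Set.contains qd q)) = true
    · have hqd : q ∉ qd := by
        intro hm
        rw [(PySem.Set.contains_iff qd q).mpr hm] at h
        simp at h
      rw [if_pos h, if_pos h]
      rw [show (((nq, qd).1 ++ [q], PySem.Set.add (nq, qd).2 q) :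
            List (Int × Int) × PySem.Set (Int × Int)) = (nq ++ [q], qd ++ [q]) from by
        simp [PySem.Set.add_of_not_mem hqd]]
      rw [ih (List.nodup_cons.mp hnd).2 (nq ++ [q]) (qd ++ [q])]
      have hfe : cand.filter (fun x => P x && !(PySem.Set.contains (qd ++ [q]) x))
          = cand.filter (fun x => P x && !(PySem.Set.contains qd x)) := by
        apply List.filter_congr
        intro x hx
        rw [pvContains_append_ne qd q x (fun he => hq (he ▸ hx))]
      rw [hfe]
      simp
    · rw [if_neg h, if_neg h]
      exact ih (List.nodup_cons.mp hnd).2 nq qd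

theorem pvStepLB2_eq (mat : List (List Int)) (n m c : Int)
    (st : (List (Int × Int) × PySem.Set (Int × Int)) × PySem.Set (Int × Int)) (p : Int × Int) :
    pvStepLB2 mat n m c st p
      = ((st.1.1 ++ (pvNbrs p.1 p.2).filter
            (fun q => (pvCandOK mat n m c q && !(PySem.Set.contains st.2 q)) &&
              !(PySem.Set.contains st.1.2 q)),
          st.1.2 ++ (pvNbrs p.1 p.2).filter
            (fun q => (pvCandOK mat n m c q && !(PySem.Set.contains st.2 q)) &&
              !(PySem.Set.contains st.1.2 q))),
         PySem.Set.add st.2 p) := by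
  unfold pvStepLB2
  rw [show (fun (nq : List (Int × Int) × PySem.Set (Int × Int)) (q : Int × Int) =>
        if ((decide (0 ≤ q.1) && decide (q.1 < n)) && (decide (0 ≤ q.2) && decide (q.2 < m))) &&
            (pvAt mat q.1 q.2 == c) && !(PySem.Set.contains st.2 q) &&
            !(PySem.Set.contains nq.2 q)
        then (nq.1 ++ [q], PySem.Set.add nq.2 q) else nq)
      = (fun (nq : List (Int × Int) × PySem.Set (Int × Int)) (q : Int × Int) =>
        if (fun q => pvCandOK mat n m c q && !(PySem.Set.contains st.2 q)) q &&
            !(PySem.Set.contains nq.2 q)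
        then (nq.1 ++ [q], PySem.Set.add nq.2 q) else nq) from rfl]
  rw [show st.1 = (st.1.1, st.1.2) from rfl]
  rw [pvInnerB (fun q => pvCandOK mat n m c q && !(PySem.Set.contains st.2 q))
    (pvNbrs p.1 p.2) (pvNbrs_nodup p.1 p.2) st.1.1 st.1.2]

theorem pvContains_add_not (done : PySem.Set (Int × Int)) (u y : Int × Int) :
    (!(PySem.Set.contains (PySem.Set.add done u) y))
      = (!(PySem.Set.contains done y) && !(y == u)) := by
  by_cases h : y ∈ PySem.Set.add done u
  · rw [(PySem.Set.contains_iff _ y).mpr h]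
    rcases (PySem.Set.mem_add done u y).mp h with h1 | h1
    · rw [(PySem.Set.contains_iff done y).mpr h1]; rfl
    · simp [h1]
  · have h1 : y ∉ done := fun hm => h ((PySem.Set.mem_add done u y).mpr (Or.inl hm))
    have h2 : y ≠ u := fun he => h ((PySem.Set.mem_add done u y).mpr (Or.inr he))
    have e1 : PySem.Set.contains (PySem.Set.add done u) y = false := by
      cases e : PySem.Set.contains (PySem.Set.add done u) y
      · rfl
      · exact absurd ((PySem.Set.contains_iff _ y).mp e) h
    have e2 : PySem.Set.contains done y = false := by
      cases e : PySem.Set.contains done y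
      · rfl
      · exact absurd ((PySem.Set.contains_iff done y).mp e) h1
    simp [h2]

theorem pvLevelDedup (mat : List (List Int)) (c : Int) :
    ∀ (qA : List (Int × Int)) (done : PySem.Set (Int × Int)) (nqA : List (Int × Int))
      (vis : PySem.Set (Int × Int)),
      (∀ u ∈ done, u ∈ vis ∧ ∀ nb ∈ pvNbrs u.1 u.2,
          pvCandOK mat (pvN mat) (pvM mat) c nb = true → nb ∈ vis ∨ nb ∈ PySem.Set.ofList nqA) →
      ((PySem.Set.ofList qA).filter (fun u => !(PySem.Set.contains done u))).foldl
          (pvStepLB2 mat (pvN mat) (pvM mat) c) ((PySem.Set.ofList nqA, PySem.Set.ofList nqA), vis)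
        = ((PySem.Set.ofList ((qA.foldl (pvStepLB mat (pvN mat) (pvM mat) c) (nqA, vis)).1),
            PySem.Set.ofList ((qA.foldl (pvStepLB mat (pvN mat) (pvM mat) c) (nqA, vis)).1)),
           (qA.foldl (pvStepLB mat (pvN mat) (pvM mat) c) (nqA, vis)).2) := by
  intro qA
  induction qA with
  | nil => intro done nqA vis _; simp
  | cons u rest ih =>
    intro done nqA vis hdone
    rw [PySem.Set.ofList_cons, List.foldl_cons, pvStepLB_eq,
      show PySem.Set.discard (PySem.Set.ofList rest) u
        = (PySem.Set.ofList rest).filter (fun y => !(y == u)) from rfl,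
      List.filter_cons, List.filter_filter]
    by_cases hu : u ∈ done
    · -- u was already processed: A's step is a no-op up to dedup, B skips it
      have hcu : (!(PySem.Set.contains done u)) = false := by
        rw [(PySem.Set.contains_iff done u).mpr hu]; rfl
      rw [if_neg (by rw [hcu]; simp)]
      have hof : PySem.Set.ofList (nqA ++ (pvNbrs u.1 u.2).filter
            (fun q => pvCandOK mat (pvN mat) (pvM mat) c q && !(PySem.Set.contains vis q)))
          = PySem.Set.ofList nqA := by
        have hnil : ((PySem.Set.ofList ((pvNbrs u.1 u.2).filter
              (fun q => pvCandOK mat (pvN mat) (pvM mat) c q && !(PySem.Set.contains vis q)))).filter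
              (fun y => !(PySem.Set.ofList nqA).contains y)) = [] := by
          rw [List.filter_eq_nil_iff]
          intro x hx
          have hx' := (PySem.Set.mem_ofList _ x).mp hx
          have h1 := List.of_mem_filter hx'
          have h2 := List.mem_of_mem_filter hx'
          have hok : pvCandOK mat (pvN mat) (pvM mat) c x = true := by
            cases e : pvCandOK mat (pvN mat) (pvM mat) c x
            · rw [e] at h1; simp at h1
            · rfl
          have hnv : x ∉ vis := by
            intro hm
            rw [(PySem.Set.contains_iff vis x).mpr hm] at h1
            simp [hok] at h1
          rcases (hdone u hu).2 x h2 hok with h3 | h3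
          · exact absurd h3 hnv
          · rw [(PySem.Set.contains_iff _ x).mpr h3]
            simp
        rw [PySem.Set.ofList_append, PySem.Set.update_eq_append_filter, hnil]
        simp
      have hvis : PySem.Set.add vis u = vis := PySem.Set.add_of_mem (hdone u hu).1
      have hdone' : ∀ w ∈ done, w ∈ vis ∧ ∀ nb ∈ pvNbrs w.1 w.2,
          pvCandOK mat (pvN mat) (pvM mat) c nb = true →
            nb ∈ vis ∨ nb ∈ PySem.Set.ofList (nqA ++ (pvNbrs u.1 u.2).filter
              (fun q => pvCandOK mat (pvN mat) (pvM mat) c q && !(PySem.Set.contains vis q))) := by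
        intro w hw
        refine ⟨(hdone w hw).1, fun nb hnb hok => ?_⟩
        rw [hof]
        exact (hdone w hw).2 nb hnb hok
      have := ih done (nqA ++ (pvNbrs u.1 u.2).filter
          (fun q => pvCandOK mat (pvN mat) (pvM mat) c q && !(PySem.Set.contains vis q)))
          vis hdone'
      rw [hof] at this
      rw [show ((PySem.Set.ofList rest).filter
            (fun a => !(PySem.Set.contains done a) && !(a == u)))
          = ((PySem.Set.ofList rest).filter (fun a => !(PySem.Set.contains done a))) from by
        apply List.filter_congr
        intro x _
        by_cases he : x = u
        · subst he; rw [hcu]; rfl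
        · simp [he]]
      rw [hvis]
      exact this
    · -- u is new: both sides process it
      have hcu : (!(PySem.Set.contains done u)) = true := by
        have : PySem.Set.contains done u = false := by
          cases e : PySem.Set.contains done u
          · rfl
          · exact absurd ((PySem.Set.contains_iff done u).mp e) hu
        rw [this]; rfl
      rw [if_pos (by rw [hcu]), List.foldl_cons, pvStepLB2_eq]
      have hof2 : PySem.Set.ofList (nqA ++ (pvNbrs u.1 u.2).filter
            (fun q => pvCandOK mat (pvN mat) (pvM mat) c q && !(PySem.Set.contains vis q)))
          = PySem.Set.ofList nqA ++ (pvNbrs u.1 u.2).filter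
              (fun q => (pvCandOK mat (pvN mat) (pvM mat) c q && !(PySem.Set.contains vis q)) &&
                !(PySem.Set.contains (PySem.Set.ofList nqA) q)) := by
        rw [PySem.Set.ofList_append, PySem.Set.update_eq_append_filter]
        congr 1
        rw [PySem.Set.ofList_eq_self_of_nodup _
          ((pvNbrs_nodup u.1 u.2).filter _), List.filter_filter]
        apply List.filter_congr
        intro x _
        rw [Bool.and_comm]
      have hdone2 : ∀ w ∈ PySem.Set.add done u, w ∈ PySem.Set.add vis u ∧
          ∀ nb ∈ pvNbrs w.1 w.2, pvCandOK mat (pvN mat) (pvM mat) c nb = true →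
            nb ∈ PySem.Set.add vis u ∨ nb ∈ PySem.Set.ofList (nqA ++ (pvNbrs u.1 u.2).filter
              (fun q => pvCandOK mat (pvN mat) (pvM mat) c q && !(PySem.Set.contains vis q))) := by
        intro w hw
        rcases (PySem.Set.mem_add done u w).mp hw with hw1 | hw1
        · refine ⟨(PySem.Set.mem_add vis u w).mpr (Or.inl (hdone w hw1).1),
            fun nb hnb hok => ?_⟩
          rcases (hdone w hw1).2 nb hnb hok with h3 | h3
          · exact Or.inl ((PySem.Set.mem_add vis u nb).mpr (Or.inl h3))
          · refine Or.inr ?_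
            rw [PySem.Set.mem_ofList] at h3 ⊢
            exact List.mem_append.mpr (Or.inl h3)
        · rw [hw1]
          refine ⟨(PySem.Set.mem_add vis u u).mpr (Or.inr rfl), fun nb hnb hok => ?_⟩
          by_cases hv : nb ∈ vis
          · exact Or.inl ((PySem.Set.mem_add vis u nb).mpr (Or.inl hv))
          · refine Or.inr ?_
            rw [PySem.Set.mem_ofList]
            refine List.mem_append.mpr (Or.inr ?_)
            apply List.mem_filter.mpr
            refine ⟨hnb, ?_⟩
            rw [hok]
            have : PySem.Set.contains vis nb = false := by
              cases e : PySem.Set.contains vis nb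
              · rfl
              · exact absurd ((PySem.Set.contains_iff vis nb).mp e) hv
            rw [this]
            rfl
      have := ih (PySem.Set.add done u) (nqA ++ (pvNbrs u.1 u.2).filter
          (fun q => pvCandOK mat (pvN mat) (pvM mat) c q && !(PySem.Set.contains vis q)))
          (PySem.Set.add vis u) hdone2
      rw [hof2] at this
      rw [show ((PySem.Set.ofList rest).filter
            (fun a => !(PySem.Set.contains done a) && !(a == u)))
          = ((PySem.Set.ofList rest).filter
            (fun a => !(PySem.Set.contains (PySem.Set.add done u) a))) from by
        apply List.filter_congr
        intro x _
        rw [pvContains_add_not]]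
      exact this

theorem pvFloodD_eq_flood (mat : List (List Int)) (c : Int) :
    ∀ (fuel : Nat) (qA : List (Int × Int)) (vis : PySem.Set (Int × Int)),
      pv_floodGo mat (pvN mat) (pvM mat) c fuel (PySem.Set.ofList qA) vis
        = pvFloodD mat (pvN mat) (pvM mat) c fuel qA vis := by
  intro fuel
  induction fuel with
  | zero => intro qA vis; rfl
  | succ f ih =>
    intro qA vis
    rw [pv_floodGo_succ2, pvFloodD_succ]
    cases qA with
    | nil => simp
    | cons u rest =>
      rw [if_neg (by rw [PySem.Set.ofList_cons]; simp), if_neg (by simp)]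
      have hlvl := pvLevelDedup mat c (u :: rest) [] [] vis (by intro w hw; simp at hw)
      have hfil : (PySem.Set.ofList (u :: rest)).filter
            (fun x => !(PySem.Set.contains ([] : PySem.Set (Int × Int)) x))
          = PySem.Set.ofList (u :: rest) :=
        List.filter_eq_self.mpr (fun x _ => rfl)
      rw [hfil, PySem.Set.ofList_nil] at hlvl
      rw [hlvl]
      exact ih _ _

theorem pvFlood_bridge (mat : List (List Int)) (i j : Int) :
    pv_flood mat (pvN mat) (pvM mat) i j
      = pvFloodD mat (pvN mat) (pvM mat) (pvAt mat i j)
          (2 * ((pvN mat) * (pvM mat)).toNat + 4) [(i, j)] [] := by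
  unfold pv_flood
  exact pvFloodD_eq_flood mat (pvAt mat i j) _ [(i, j)] []

theorem pvPass (mat : List (List Int)) :
    ∀ (l : List (Int × Int)) (comps : PySem.Dict (Int × Int × Int) (List (Int × Int × Int)))
      (visB : PySem.Set (Int × Int)) (best : Int),
      (∀ p ∈ l, pvValid mat p) →
      comps.keys.Nodup →
      (∀ k ∈ comps.keys, k ∈ visB.map (pvLiftAt mat)) →
      best = pvMaxFold (comps.items.map (fun pr => PySem.List.len pr.2)) →
      visB.Nodup →
      ((l.map (pvLiftAt mat)).foldl (pvStepCG (pv_make_graph mat)) (comps, visB.map (pvLiftAt mat))).2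
          = (l.foldl (pvStepCB mat) (visB, best)).1.map (pvLiftAt mat)
        ∧ ((l.map (pvLiftAt mat)).foldl (pvStepCG (pv_make_graph mat)) (comps, visB.map (pvLiftAt mat))).1.keys.Nodup
        ∧ (∀ k ∈ ((l.map (pvLiftAt mat)).foldl (pvStepCG (pv_make_graph mat)) (comps, visB.map (pvLiftAt mat))).1.keys,
             k ∈ ((l.map (pvLiftAt mat)).foldl (pvStepCG (pv_make_graph mat)) (comps, visB.map (pvLiftAt mat))).2)
        ∧ (l.foldl (pvStepCB mat) (visB, best)).2
            = pvMaxFold ((((l.map (pvLiftAt mat)).foldl (pvStepCG (pv_make_graph mat)) (comps, visB.map (pvLiftAt mat))).1.items).map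
                (fun pr => PySem.List.len pr.2))
        ∧ ((l.foldl (pvStepCB mat) (visB, best)).1).Nodup
        ∧ (∀ p ∈ l, p ∈ (l.foldl (pvStepCB mat) (visB, best)).1)
        ∧ (∀ p ∈ visB, p ∈ (l.foldl (pvStepCB mat) (visB, best)).1) := by
  intro l
  induction l with
  | nil =>
    intro comps visB best hval hkn hkv hbest hnd
    refine ⟨rfl, hkn, hkv, ?_, hnd, by simp, fun p hp => hp⟩
    simpa using hbest
  | cons p l ih =>
    intro comps visB best hval hkn hkv hbest hnd
    rw [List.map_cons, List.foldl_cons, List.foldl_cons]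
    by_cases hc : p ∈ visB
    · have hcB : PySem.Set.contains visB p = true := (PySem.Set.contains_iff visB p).mpr hc
      have hcA : PySem.Set.contains (visB.map (pvLiftAt mat)) (pvLiftAt mat p) = true := by
        rw [pvContains_map (pvLiftAt_inj mat)]; exact hcB
      rw [show pvStepCG (pv_make_graph mat) (comps, visB.map (pvLiftAt mat)) (pvLiftAt mat p)
            = (comps, visB.map (pvLiftAt mat)) from by unfold pvStepCG; rw [hcA]; simp,
          show pvStepCB mat (visB, best) p = (visB, best) from by unfold pvStepCB; rw [hcB]; simp]
      obtain ⟨h1, h2, h3, h4, h5, h6, h7⟩ :=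
        ih comps visB best (fun x hx => hval x (List.mem_cons_of_mem _ hx)) hkn hkv hbest hnd
      exact ⟨h1, h2, h3, h4, h5,
        fun x hx => (List.mem_cons.mp hx).elim (fun e => e ▸ h7 p hc) (fun hx' => h6 x hx'),
        h7⟩
    · have hcB : PySem.Set.contains visB p = false := by
        cases hb : PySem.Set.contains visB p
        · rfl
        · exact absurd ((PySem.Set.contains_iff visB p).mp hb) hc
      have hcA : PySem.Set.contains (visB.map (pvLiftAt mat)) (pvLiftAt mat p) = false := by
        rw [pvContains_map (pvLiftAt_inj mat)]; exact hcB
      have hvp : pvValid mat p := hval p List.mem_cons_self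
      -- the two component computations agree
      have hliftc : pvLiftAt mat p = pvLift (pvAt mat p.1 p.2) p := rfl
      have hfb := pvFlood_bridge mat p.1 p.2
      have hcomp : pv_bfs (pvLiftAt mat p) (pv_make_graph mat)
          = (pv_flood mat (pvN mat) (pvM mat) p.1 p.2).map (pvLift (pvAt mat p.1 p.2)) := by
        rw [hfb]
        unfold pv_bfs
        rw [pvFuel_eq mat]
        rw [show (pvN mat * pvM mat).toNat = ((pvN mat) * (pvM mat)).toNat from rfl]
        rw [show ([pvLiftAt mat p] : List (Int × Int × Int))
              = ([p] : List (Int × Int)).map (pvLift (pvAt mat p.1 p.2)) from by simp [hliftc],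
            show ([] : PySem.Set (Int × Int × Int))
              = (([] : PySem.Set (Int × Int)).map (pvLift (pvAt mat p.1 p.2))) from rfl]
        exact pvFlood_lockstep mat (pvAt mat p.1 p.2) _ [p] []
          (by intro x hx; rcases List.mem_singleton.mp hx with rfl; exact ⟨hvp, rfl⟩)
      have hgoodc : ∀ x ∈ pv_flood mat (pvN mat) (pvM mat) p.1 p.2,
          pvGood mat (pvAt mat p.1 p.2) x := by
        rw [hfb]
        exact pvFlood_good mat (pvAt mat p.1 p.2)
          (2 * ((pvN mat) * (pvM mat)).toNat + 4) [p] []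
          (by intro x hx; rcases List.mem_singleton.mp hx with rfl; exact ⟨hvp, rfl⟩)
          (by intro x hx; simp at hx)
      have hcompAt : pv_bfs (pvLiftAt mat p) (pv_make_graph mat)
          = (pv_flood mat (pvN mat) (pvM mat) p.1 p.2).map (pvLiftAt mat) := by
        rw [hcomp]
        apply List.map_congr_left
        intro x hx
        have hg := hgoodc x hx
        simp [pvLift, pvLiftAt, hg.2]
      have hpmem : p ∈ pv_flood mat (pvN mat) (pvM mat) p.1 p.2 := by
        rw [hfb]
        rw [show 2 * ((pvN mat) * (pvM mat)).toNat + 4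
              = (2 * ((pvN mat) * (pvM mat)).toNat + 3) + 1 from by omega]
        exact pvFlood_start mat (pvN mat) (pvM mat) (pvAt mat p.1 p.2) _ _ [] p (by simp)
      have hnotkey : pvLiftAt mat p ∉ comps.keys := fun hk => by
        have := hkv _ hk
        exact hc (by
          rcases List.mem_map.mp this with ⟨x, hx, he⟩
          rcases pvLiftAt_inj mat he with rfl
          exact hx)
      have hfc : comps.contains (pvLiftAt mat p) = false := by
        cases hb : comps.contains (pvLiftAt mat p)
        · rfl
        · exact absurd ((PySem.Dict.contains_iff_mem_keys comps _).mp hb) hnotkey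
      rw [show pvStepCG (pv_make_graph mat) (comps, visB.map (pvLiftAt mat)) (pvLiftAt mat p)
            = (comps.insert (pvLiftAt mat p) (pv_bfs (pvLiftAt mat p) (pv_make_graph mat)),
               PySem.Set.union (visB.map (pvLiftAt mat)) (pv_bfs (pvLiftAt mat p) (pv_make_graph mat)))
            from by unfold pvStepCG; rw [hcA]; simp,
          show pvStepCB mat (visB, best) p
            = (PySem.Set.union visB (pv_flood mat (pvN mat) (pvM mat) p.1 p.2),
               if PySem.List.len (pv_flood mat (pvN mat) (pvM mat) p.1 p.2) > best
               then PySem.List.len (pv_flood mat (pvN mat) (pvM mat) p.1 p.2) else best)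
            from by unfold pvStepCB; rw [hcB]; simp]
      rw [hcompAt, ← pvUnion_map (pvLiftAt_inj mat)]
      -- invariants for the new state
      have hkn' : (comps.insert (pvLiftAt mat p)
          ((pv_flood mat (pvN mat) (pvM mat) p.1 p.2).map (pvLiftAt mat))).keys.Nodup := by
        rw [PySem.Dict.keys_insert_of_not_contains comps _ hfc]
        exact List.Nodup.append hkn (List.nodup_singleton _)
          (fun a ha hb => hnotkey ((List.mem_singleton.mp hb) ▸ ha))
      have hkv' : ∀ k ∈ (comps.insert (pvLiftAt mat p)
            ((pv_flood mat (pvN mat) (pvM mat) p.1 p.2).map (pvLiftAt mat))).keys,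
          k ∈ (PySem.Set.union visB (pv_flood mat (pvN mat) (pvM mat) p.1 p.2)).map (pvLiftAt mat) := by
        intro k hk
        rw [PySem.Dict.keys_insert_of_not_contains comps _ hfc] at hk
        rcases List.mem_append.mp hk with hk | hk
        · have := hkv k hk
          rcases List.mem_map.mp this with ⟨x, hx, rfl⟩
          exact List.mem_map_of_mem ((PySem.Set.mem_union _ _ x).mpr (Or.inl hx))
        · rcases List.mem_singleton.mp hk with rfl
          exact List.mem_map_of_mem ((PySem.Set.mem_union _ _ p).mpr (Or.inr hpmem))
      have hbest' : (if PySem.List.len (pv_flood mat (pvN mat) (pvM mat) p.1 p.2) > best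
            then PySem.List.len (pv_flood mat (pvN mat) (pvM mat) p.1 p.2) else best)
          = pvMaxFold (((comps.insert (pvLiftAt mat p)
              ((pv_flood mat (pvN mat) (pvM mat) p.1 p.2).map (pvLiftAt mat))).items).map
              (fun pr => PySem.List.len pr.2)) := by
        rw [PySem.Dict.items_insert_of_not_contains comps _ hfc, List.map_append]
        rw [show (List.map (fun pr => PySem.List.len pr.2)
              [((pvLiftAt mat p), (pv_flood mat (pvN mat) (pvM mat) p.1 p.2).map (pvLiftAt mat))])
            = [PySem.List.len (pv_flood mat (pvN mat) (pvM mat) p.1 p.2)] from by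
          simp [PySem.List.len_eq]]
        rw [pvMaxFold_append_singleton, hbest]
      have hnd' : (PySem.Set.union visB (pv_flood mat (pvN mat) (pvM mat) p.1 p.2)).Nodup :=
        PySem.Set.nodup_union _ _ hnd
      obtain ⟨h1, h2, h3, h4, h5, h6, h7⟩ :=
        ih (comps.insert (pvLiftAt mat p) ((pv_flood mat (pvN mat) (pvM mat) p.1 p.2).map (pvLiftAt mat)))
          (PySem.Set.union visB (pv_flood mat (pvN mat) (pvM mat) p.1 p.2))
          (if PySem.List.len (pv_flood mat (pvN mat) (pvM mat) p.1 p.2) > best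
           then PySem.List.len (pv_flood mat (pvN mat) (pvM mat) p.1 p.2) else best)
          (fun x hx => hval x (List.mem_cons_of_mem _ hx)) hkn' hkv' hbest' hnd'
      refine ⟨h1, h2, h3, h4, h5, ?_, ?_⟩
      · intro x hx
        rcases List.mem_cons.mp hx with rfl | hx'
        · exact h7 x ((PySem.Set.mem_union _ _ x).mpr (Or.inr hpmem))
        · exact h6 x hx'
      · intro x hx
        exact h7 x ((PySem.Set.mem_union _ _ x).mpr (Or.inl hx))

theorem pvLen_le (l₁ l₂ : List (Int × Int)) (h : l₁.Nodup) (hs : ∀ x ∈ l₁, x ∈ l₂) :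
    l₁.length ≤ l₂.length := by
  calc l₁.length = l₁.toFinset.card := (List.toFinset_card_of_nodup h).symm
    _ ≤ l₂.toFinset.card := Finset.card_le_card
        (fun x hx => List.mem_toFinset.mpr (hs x (List.mem_toFinset.mp hx)))
    _ ≤ l₂.length := l₂.toFinset_card_le

theorem pvFinalFold (d : PySem.Dict (Int × Int × Int) (List (Int × Int × Int)))
    (hnd : d.keys.Nodup) :
    d.keys.foldl (fun mx k =>
        if PySem.List.len (d.getD k []) > mx then PySem.List.len (d.getD k []) else mx) 0
      = pvMaxFold (d.items.map (fun pr => PySem.List.len pr.2)) := by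
  rw [PySem.Dict.items_eq_map_keys d hnd [], List.map_map]
  unfold pvMaxFold
  rw [List.foldl_map]
  rfl

theorem pvMain (mat : List (List Int)) :
    max_connected_colors mat = max_connected_colors_alt mat := by
  rw [pvAlt_eq]
  show (pv_get_components (pv_make_graph mat)).keys.foldl
      (fun mx k => if PySem.List.len ((pv_get_components (pv_make_graph mat)).getD k []) > mx
        then PySem.List.len ((pv_get_components (pv_make_graph mat)).getD k []) else mx) 0
    = ((pvCells mat).foldl (pvStepCB mat) ([], 0)).2
  rw [show pv_get_components (pv_make_graph mat)
      = pv_get_componentsGo (pv_make_graph mat) ((pv_make_graph mat).keys)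
          ((pv_make_graph mat).keys.length + 1) PySem.Dict.empty [] from rfl]
  rw [pv_graph_keys]
  by_cases hl : pvCells mat = []
  · rw [hl]
    simp only [List.map_nil, List.foldl_nil]
    rw [show pv_get_componentsGo (pv_make_graph mat) [] ([].length + 1) PySem.Dict.empty []
        = PySem.Dict.empty from by
      rw [pv_get_componentsGo_succ]
      simp [PySem.List.len_eq]]
    simp [PySem.Dict.keys_empty]
  · obtain ⟨h1, h2, h3, h4, h5, h6, h7⟩ :=
      pvPass mat (pvCells mat) PySem.Dict.empty [] 0
        (fun p hp => (pvMem_cells mat p).mp hp)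
        (by simp [PySem.Dict.keys_empty])
        (by simp [PySem.Dict.keys_empty])
        (by simp [pvMaxFold, show (PySem.Dict.empty :
              PySem.Dict (Int × Int × Int) (List (Int × Int × Int))).items = [] from rfl])
        List.nodup_nil
    have hlen : ((pvCells mat).map (pvLiftAt mat)).length = (pvCells mat).length :=
      List.length_map ..
    obtain ⟨f', hf'⟩ : ∃ f', ((pvCells mat).map (pvLiftAt mat)).length + 1 = (f' + 1) + 1 :=
      ⟨((pvCells mat).map (pvLiftAt mat)).length - 1, by
        have : 0 < (pvCells mat).length := List.length_pos_of_ne_nil hl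
        omega⟩
    rw [hf', pv_get_componentsGo_succ]
    rw [if_pos (by
      simp only [PySem.List.len_eq, List.length_nil, hlen]
      exact_mod_cast List.length_pos_of_ne_nil hl)]
    rw [show (([] : PySem.Set (Int × Int × Int)))
        = ([] : PySem.Set (Int × Int)).map (pvLiftAt mat) from rfl]
    rw [pv_get_componentsGo_succ]
    rw [if_neg (by
      simp only [PySem.List.len_eq, hlen, h1, List.length_map]
      have := pvLen_le (pvCells mat) ((pvCells mat).foldl (pvStepCB mat) ([], 0)).1
        (pvCells_nodup mat) h6
      omega)]
    simp only [List.map_nil] at h2 h4 ⊢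
    rw [pvFinalFold _ h2]
    exact h4.symm

-- ===== VERDICT (by name: the statement is the Claim_ definition above) =====
theorem max_connected_colors_spec : Claim_equal_max_connected_colors := by
  intro mat _ _
  unfold Spec_max_connected_colors
  exact pvMain mat
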